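-- pv_equiv track=rewrite | github.com/bebopkenny/Python-DSA | BootDev/Big_O/order_n_squared.py | does_name_exist
-- ===== SOURCE A (Python) =====
-- def does_name_exist(first_names, last_names, full_name):
--     matching_name = ""
--     for i in first_names:
--         for j in last_names:
--             matching_name = f"{i} {j}"
--             if matching_name == full_name:
--                 return True
--     return False
-- ===== SOURCE B (Python) =====
-- def does_name_exist(first_names, last_names, full_name):
--     firsts = set(first_names)
--     lasts = set(last_names)
--     for k, ch in enumerate(full_name):
--         if ch == ' ' and full_name[:k] in firsts and full_name[k + 1:] in lasts:
--             return True
--     return False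
-- ===== Notes on version B (the rewrite author's own statement) =====
-- stated objective: faster
-- what changed: Instead of testing every first+last pair against full_name, B builds hash sets of the names once and scans full_name for space positions, checking prefix/suffix set membership at each split point.
import Mathlib
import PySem

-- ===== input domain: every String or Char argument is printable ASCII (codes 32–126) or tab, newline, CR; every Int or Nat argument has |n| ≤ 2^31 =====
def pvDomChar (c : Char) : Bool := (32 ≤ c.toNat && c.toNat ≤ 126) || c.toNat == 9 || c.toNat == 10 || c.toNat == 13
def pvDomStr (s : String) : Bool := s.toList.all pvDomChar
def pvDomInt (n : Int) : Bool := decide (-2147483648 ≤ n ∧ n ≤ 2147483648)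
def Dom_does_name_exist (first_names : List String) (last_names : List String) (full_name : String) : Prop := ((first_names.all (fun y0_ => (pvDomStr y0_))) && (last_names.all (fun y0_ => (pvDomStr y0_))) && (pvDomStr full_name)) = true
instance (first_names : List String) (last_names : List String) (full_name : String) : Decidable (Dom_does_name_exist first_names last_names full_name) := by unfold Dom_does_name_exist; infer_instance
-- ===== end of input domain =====

-- B replaces A's all-pairs scan by hash sets of the names plus one scan over full_name's
-- split points (faster; the asymptotic change is measured, not proved).
-- Strings are ported through List Char: f"{i} {j}" == full_name is exactly
-- i.toList ++ ' ' :: j.toList = full_name.toList (String equality is toList equality).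

-- ===== PORT A =====
-- inner 'for j in last_names' loop (early return True on match)
def pvAInner (i : String) (last_names : List String) (full : List Char) : Bool :=
  match last_names with
  | [] => false
  | j :: rest =>
    let matching_name := i.toList ++ ' ' :: j.toList   -- f"{i} {j}"
    if matching_name = full then true else pvAInner i rest full

-- outer 'for i in first_names' loop
def pvAOuter (first_names : List String) (last_names : List String) (full : List Char) : Bool :=
  match first_names with
  | [] => false
  | i :: rest =>
    if pvAInner i last_names full then true else pvAOuter rest last_names full

def does_name_exist (first_names : List String) (last_names : List String) (full_name : String) : Bool :=
  pvAOuter first_names last_names full_name.toList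

-- ===== PORT B =====
-- 'for k, ch in enumerate(full_name)' with the slices full_name[:k] / full_name[k+1:]
-- as PySem.List.slice on the char list (exact: nonnegative bounds)
def pvBLoop (firsts lasts : PySem.Set (List Char)) (cs : List Char) (k : Nat) (full : List Char) : Bool :=
  match cs with
  | [] => false
  | ch :: rest =>
    if ch = ' ' && firsts.contains (PySem.List.slice full none (some ((k : Nat) : Int)))
        && lasts.contains (PySem.List.slice full (some ((k + 1 : Nat) : Int)) none) then true
    else pvBLoop firsts lasts rest (k + 1) full

def does_name_exist_alt (first_names : List String) (last_names : List String) (full_name : String) : Bool :=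
  let firsts : PySem.Set (List Char) := PySem.Set.ofList (first_names.map String.toList)
  let lasts : PySem.Set (List Char) := PySem.Set.ofList (last_names.map String.toList)
  pvBLoop firsts lasts full_name.toList 0 full_name.toList

-- ===== PRECONDITION & SPEC =====
def Spec_does_name_exist (first_names : List String) (last_names : List String) (full_name : String) (out : Bool) : Prop := out = does_name_exist_alt first_names last_names full_name
instance (first_names : List String) (last_names : List String) (full_name : String) (out : Bool) : Decidable (Spec_does_name_exist first_names last_names full_name out) := by unfold Spec_does_name_exist; infer_instance

-- ===== CLAIM (what is proved, stated in full; the proofs are below) =====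
def Claim_equal_does_name_exist : Prop := ∀ (first_names : List String) (last_names : List String) (full_name : String), Dom_does_name_exist first_names last_names full_name → Spec_does_name_exist first_names last_names full_name (does_name_exist first_names last_names full_name)

-- ===== LEMMAS AND PROOFS =====

lemma pvAInner_iff (i : String) (ln : List String) (full : List Char) :
    pvAInner i ln full = true ↔ ∃ j ∈ ln, i.toList ++ ' ' :: j.toList = full := by
  induction ln with
  | nil => simp [pvAInner]
  | cons j rest ih =>
    simp only [pvAInner]
    split_ifs with h
    · simp [h]
    · simp [ih, h]

lemma pvAOuter_iff (fn ln : List String) (full : List Char) :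
    pvAOuter fn ln full = true ↔ ∃ i ∈ fn, ∃ j ∈ ln, i.toList ++ ' ' :: j.toList = full := by
  induction fn with
  | nil => simp [pvAOuter]
  | cons i rest ih =>
    simp only [pvAOuter]
    split_ifs with h
    · exact iff_of_true rfl ⟨i, List.mem_cons_self, (pvAInner_iff i ln full).mp h⟩
    · rw [Bool.not_eq_true] at h
      constructor
      · intro hr
        rcases ih.mp hr with ⟨i', hi', hj⟩
        exact ⟨i', List.mem_cons_of_mem _ hi', hj⟩
      · rintro ⟨i', hi', hj⟩
        rcases List.mem_cons.mp hi' with rfl | hm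
        · exact absurd ((pvAInner_iff i' ln full).mpr hj) (by simp [h])
        · exact ih.mpr ⟨i', hm, hj⟩

lemma pvBLoop_iff (F L : PySem.Set (List Char)) (cs : List Char) (k : Nat) (full : List Char) :
    pvBLoop F L cs k full = true ↔
      ∃ m : Nat, cs[m]? = some ' ' ∧ full.take (k + m) ∈ F ∧ full.drop (k + m + 1) ∈ L := by
  induction cs generalizing k with
  | nil => simp [pvBLoop]
  | cons ch rest ih =>
    simp only [pvBLoop, PySem.List.slice_to_natCast, PySem.List.slice_from_natCast]
    split_ifs with h
    · simp only [Bool.and_eq_true, decide_eq_true_eq, PySem.Set.contains_iff] at h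
      obtain ⟨⟨hc, hf⟩, hl⟩ := h
      constructor
      · intro _; exact ⟨0, by simp [hc], by simpa using hf, by simpa using hl⟩
      · intro _; rfl
    · rw [ih (k + 1)]
      constructor
      · rintro ⟨m, hm, hf, hl⟩
        exact ⟨m + 1, by simpa using hm, by simpa [Nat.add_assoc, Nat.add_comm 1 m] using hf,
               by simpa [Nat.add_assoc, Nat.add_comm 1 m] using hl⟩
      · rintro ⟨m, hm, hf, hl⟩
        cases m with
        | zero =>
          exfalso
          apply h
          simp only [List.getElem?_cons_zero, Option.some.injEq] at hm
          simp [hm, (by simpa using hf : full.take k ∈ F),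
                (by simpa using hl : full.drop (k + 1) ∈ L)]
        | succ m' =>
          exact ⟨m', by simpa using hm, by simpa [Nat.add_assoc, Nat.add_comm 1 m'] using hf,
                 by simpa [Nat.add_assoc, Nat.add_comm 1 m'] using hl⟩

-- the split-point correspondence: a matching pair exists iff some space position splits
-- full into a member of fnL and a member of lnL
lemma pvSplit_iff (fnL lnL : List (List Char)) (full : List Char) :
    (∃ i ∈ fnL, ∃ j ∈ lnL, i ++ ' ' :: j = full) ↔
      ∃ p : Nat, full[p]? = some ' ' ∧ full.take p ∈ fnL ∧ full.drop (p + 1) ∈ lnL := by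
  constructor
  · rintro ⟨i, hi, j, hj, rfl⟩
    refine ⟨i.length, ?_, ?_, ?_⟩
    · rw [List.getElem?_append_right (Nat.le_refl _)]
      simp
    · simpa using hi
    · have : (i ++ ' ' :: j).drop (i.length + 1) = j := by
        rw [show i.length + 1 = i.length + 1 from rfl, ← List.drop_drop,
            List.drop_left]
        rfl
      rw [this]; exact hj
  · rintro ⟨p, hp, hf, hl⟩
    have hlt : p < full.length := (List.getElem?_eq_some_iff.mp hp).1
    have hge : full[p] = ' ' := by
      have := (List.getElem?_eq_some_iff.mp hp).2; exact this
    refine ⟨full.take p, hf, full.drop (p + 1), hl, ?_⟩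
    have hdrop : full.drop p = full[p] :: full.drop (p + 1) :=
      List.drop_eq_getElem_cons hlt
    calc full.take p ++ ' ' :: full.drop (p + 1)
        = full.take p ++ full.drop p := by rw [hdrop, hge]
      _ = full := List.take_append_drop _ _

lemma pvA_iff (fn ln : List String) (full_name : String) :
    does_name_exist fn ln full_name = true ↔
      ∃ i ∈ fn, ∃ j ∈ ln, i.toList ++ ' ' :: j.toList = full_name.toList := by
  simp [does_name_exist, pvAOuter_iff]

lemma pvB_iff (fn ln : List String) (full_name : String) :
    does_name_exist_alt fn ln full_name = true ↔
      ∃ p : Nat, full_name.toList[p]? = some ' ' ∧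
        full_name.toList.take p ∈ fn.map String.toList ∧
        full_name.toList.drop (p + 1) ∈ ln.map String.toList := by
  simp only [does_name_exist_alt, pvBLoop_iff, Nat.zero_add, PySem.Set.mem_ofList]

-- ===== VERDICT (by name: the statement is the Claim_ definition above) =====
theorem does_name_exist_spec : Claim_equal_does_name_exist := by
  intro fn ln full_name _
  unfold Spec_does_name_exist
  apply Bool.eq_iff_iff.mpr
  rw [pvA_iff, pvB_iff, ← pvSplit_iff (fn.map String.toList) (ln.map String.toList)]
  constructor
  · rintro ⟨i, hi, j, hj, h⟩
    exact ⟨i.toList, List.mem_map_of_mem hi, j.toList, List.mem_map_of_mem hj, h⟩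
  · rintro ⟨iL, hi, jL, hj, h⟩
    rcases List.mem_map.mp hi with ⟨i, hi', rfl⟩
    rcases List.mem_map.mp hj with ⟨j, hj', rfl⟩
    exact ⟨i, hi', j, hj', h⟩
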